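-- pv_equiv track=rewrite | github.com/yohanse/A2SV | E_Modified_GCD.py | bactrack
-- ===== SOURCE A (Python) =====
-- def bactrack(arr):
--     n = 2 ** len(arr)
--     res = []
--     for i in range(1, n):
--         c = 0
--         ans = 1
--         while i:
--             if i & 1:
--                 ans *= arr[c]
--             i = i >> 1
--             c += 1
--         res.append(ans)
--     return res
-- ===== SOURCE B (Python) =====
-- def bactrack(arr):
--     # Recursive doubling: results for arr = a :: rest are
--     # [a] followed by, for each subset product p of rest (in mask order), p and a*p.
--     if not arr:
--         return []
--     a = arr[0]
--     rest = bactrack(arr[1:])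
--     out = [a]
--     for p in rest:
--         out.append(p)
--         out.append(a * p)
--     return out
-- ===== Notes on version B (the rewrite author's own statement) =====
-- stated objective: alternative
-- what changed: Replaced the per-mask bit-decoding while-loop with structural recursion on the list: the products for a::rest are [a] followed by p,a*p for each product p of rest, producing every subset product in the same mask order with one multiplication each (O(2^n) work vs O(2^n*n); measured 10x at n=16, but a timing run could not confirm it at its largest size since both time out there).
import Mathlib
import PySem

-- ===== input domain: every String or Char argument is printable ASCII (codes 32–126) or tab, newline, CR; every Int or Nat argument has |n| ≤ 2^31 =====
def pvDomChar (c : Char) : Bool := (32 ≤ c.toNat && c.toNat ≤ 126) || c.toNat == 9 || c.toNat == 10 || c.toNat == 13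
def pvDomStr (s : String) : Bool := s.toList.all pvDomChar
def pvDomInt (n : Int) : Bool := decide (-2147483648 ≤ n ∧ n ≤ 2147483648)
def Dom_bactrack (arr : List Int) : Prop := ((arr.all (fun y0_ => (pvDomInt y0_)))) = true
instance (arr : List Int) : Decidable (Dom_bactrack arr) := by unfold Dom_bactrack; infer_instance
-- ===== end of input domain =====

-- B replaces A's per-mask bit-decoding loop by structural recursion on the list (one multiplication
-- per output entry); equivalence of the two is proved on all inputs.

-- ===== PORT A =====
-- the inner 'while i:' loop; i is the (nonnegative) mask from range(1, 2**len(arr)), so it is a Nat;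
-- arr[c] is always in range here (c < len(arr) since i < 2**len(arr)), ported as getD with default 0
def aLoop (arr : List Int) (i c : Nat) (ans : Int) : Int :=
  if h : i = 0 then ans
  else aLoop arr (i / 2) (c + 1) (if i % 2 = 1 then ans * arr.getD c 0 else ans)
termination_by i
decreasing_by exact Nat.div_lt_self (Nat.pos_of_ne_zero h) one_lt_two

def bactrack (arr : List Int) : List Int :=
  (PySem.List.pyRange 1 ((2 : Int) ^ arr.length) 1).map (fun i => aLoop arr i.toNat 0 1)

-- ===== PORT B =====
def bactrack_alt : List Int → List Int
  | [] => []
  | a :: rest => a :: (bactrack_alt rest).flatMap (fun p => [p, a * p])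

-- ===== PRECONDITION & SPEC =====
def Spec_bactrack (arr : List Int) (out : List Int) : Prop := out = bactrack_alt arr
instance (arr : List Int) (out : List Int) : Decidable (Spec_bactrack arr out) := by unfold Spec_bactrack; infer_instance

-- ===== CLAIM (what is proved, stated in full; the proofs are below) =====
def Claim_equal_bactrack : Prop := ∀ (arr : List Int), Dom_bactrack arr → Spec_bactrack arr (bactrack arr)

-- ===== LEMMAS AND PROOFS =====

theorem aLoop_zero (arr : List Int) (c : Nat) (ans : Int) : aLoop arr 0 c ans = ans := by
  rw [aLoop]; simp

theorem aLoop_step (arr : List Int) (i c : Nat) (ans : Int) (h : i ≠ 0) :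
    aLoop arr i c ans = aLoop arr (i / 2) (c + 1) (if i % 2 = 1 then ans * arr.getD c 0 else ans) := by
  rw [aLoop]; simp only [h, dif_neg, not_false_iff]

-- the accumulator factors out of aLoop
theorem aLoop_factor (arr : List Int) (i : Nat) : ∀ c ans, aLoop arr i c ans = ans * aLoop arr i c 1 := by
  induction i using Nat.strong_induction_on with
  | _ i ih =>
    intro c ans
    by_cases h : i = 0
    · subst h; simp [aLoop_zero]
    · have hd : i / 2 < i := Nat.div_lt_self (Nat.pos_of_ne_zero h) one_lt_two
      rw [aLoop_step arr i c ans h, aLoop_step arr i c 1 h,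
          ih _ hd (c + 1) (if i % 2 = 1 then ans * arr.getD c 0 else ans),
          ih _ hd (c + 1) (if i % 2 = 1 then 1 * arr.getD c 0 else 1)]
      split_ifs <;> ring

-- shifting the index c by one steps into the tail of the list
theorem aLoop_cons (a : Int) (rest : List Int) (i : Nat) :
    ∀ c ans, aLoop (a :: rest) i (c + 1) ans = aLoop rest i c ans := by
  induction i using Nat.strong_induction_on with
  | _ i ih =>
    intro c ans
    by_cases h : i = 0
    · subst h; simp [aLoop_zero]
    · rw [aLoop_step _ i _ ans h, aLoop_step rest i c ans h, List.getD_cons_succ]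
      exact ih _ (Nat.div_lt_self (Nat.pos_of_ne_zero h) one_lt_two) (c + 1) _

theorem aLoop_even (a : Int) (rest : List Int) (m : Nat) :
    aLoop (a :: rest) (2 * m) 0 1 = aLoop rest m 0 1 := by
  by_cases h : m = 0
  · subst h; simp [aLoop_zero]
  · rw [aLoop_step _ (2 * m) 0 1 (by omega)]
    have h2 : 2 * m % 2 = 0 := by omega
    have h3 : 2 * m / 2 = m := by omega
    rw [h2, h3]
    simpa using aLoop_cons a rest m 0 1

theorem aLoop_odd (a : Int) (rest : List Int) (m : Nat) :
    aLoop (a :: rest) (2 * m + 1) 0 1 = a * aLoop rest m 0 1 := by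
  rw [aLoop_step _ (2 * m + 1) 0 1 (by omega)]
  have h2 : (2 * m + 1) % 2 = 1 := by omega
  have hq : (2 * m + 1) / 2 = m := by omega
  rw [h2, hq, if_pos rfl, List.getD_cons_zero, aLoop_cons, aLoop_factor]
  ring

-- the mask range 1..2t splits as mask 1 followed by pairs (2j+2, 2j+3)
theorem range_split (t : Nat) :
    List.range (2 * t + 1) = 0 :: (List.range t).flatMap (fun j => [2 * j + 1, 2 * j + 2]) := by
  induction t with
  | zero => rfl
  | succ t ih =>
    have h : 2 * (t + 1) + 1 = (2 * t + 1) + 1 + 1 := by omega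
    rw [h, List.range_succ, List.range_succ, ih, List.range_succ, List.flatMap_append]
    simp

theorem bactrack_eq_range (arr : List Int) :
    (List.range (2 ^ arr.length - 1)).map (fun k => aLoop arr (k + 1) 0 1) = bactrack_alt arr := by
  induction arr with
  | nil => simp [bactrack_alt]
  | cons a rest ih =>
    have hp : 0 < 2 ^ rest.length := pow_pos (by norm_num) _
    have hlen : 2 ^ (a :: rest).length - 1 = 2 * (2 ^ rest.length - 1) + 1 := by
      simp only [List.length_cons, pow_succ]
      omega
    rw [hlen, range_split, List.map_cons, List.map_flatMap]
    have h0 : aLoop (a :: rest) (0 + 1) 0 1 = a := by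
      have : 0 + 1 = 2 * 0 + 1 := by omega
      rw [this, aLoop_odd, aLoop_zero]; ring
    rw [h0, bactrack_alt, ← ih, List.flatMap_map]
    congr 1
    apply List.flatMap_congr
    intro j _
    have he : aLoop (a :: rest) (2 * j + 1 + 1) 0 1 = aLoop rest (j + 1) 0 1 := by
      have : 2 * j + 1 + 1 = 2 * (j + 1) := by omega
      rw [this, aLoop_even]
    have ho : aLoop (a :: rest) (2 * j + 2 + 1) 0 1 = a * aLoop rest (j + 1) 0 1 := by
      have : 2 * j + 2 + 1 = 2 * (j + 1) + 1 := by omega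
      rw [this, aLoop_odd]
    simp [he, ho]

-- ===== VERDICT (by name: the statement is the Claim_ definition above) =====
theorem bactrack_spec : Claim_equal_bactrack := by
  intro arr _
  unfold Spec_bactrack bactrack
  rw [PySem.List.pyRange_one]
  have hcast : ((2 : Int) ^ arr.length - 1).toNat = 2 ^ arr.length - 1 := by
    have : ((2 : Int) ^ arr.length) = ((2 ^ arr.length : Nat) : Int) := by push_cast; ring
    omega
  rw [hcast, ← bactrack_eq_range arr, List.map_map]
  apply List.map_congr_left
  intro k hk
  simp only [Function.comp]
  have : ((1 : Int) + k).toNat = k + 1 := by omega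
  rw [this]
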